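-- pv_equiv track=rewrite | github.com/jisujisu1232/aws_sg_firewall_analyzer | sg_firewall_maker.py | getStartswithIdx
-- ===== SOURCE A (Python) =====
-- def getStartswithIdx(binary_list, prefix):
--     cnt = 0
--     startIdx=-1
--     endIdx=-1
--     binaryLen = len(binary_list)
--     if binaryLen==0:
--         return [-1, -1]
--     for idx, binary in enumerate(binary_list):
--         if binary.startswith(prefix):
--             if startIdx==-1:
--                 startIdx = idx
--             endIdx = idx
--         elif binary > prefix:
--             return [startIdx, endIdx]
--     else:
--         if endIdx > -1:
--             return [startIdx, endIdx]
--         return [len(binary_list), len(binary_list)-1]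
-- ===== SOURCE B (Python) =====
-- def getStartswithIdx(binary_list, prefix):
--     if not binary_list:
--         return [-1, -1]
--     stop = next((i for i, s in enumerate(binary_list)
--                  if not s.startswith(prefix) and s > prefix), None)
--     region = binary_list if stop is None else binary_list[:stop]
--     matches = [i for i, s in enumerate(region) if s.startswith(prefix)]
--     if matches:
--         return [matches[0], matches[-1]]
--     if stop is not None:
--         return [-1, -1]
--     return [len(binary_list), len(binary_list) - 1]
-- ===== Notes on version B (the rewrite author's own statement) =====
-- stated objective: alternative
-- what changed: A's single stateful scan with startIdx/endIdx accumulators and a mid-loop early return is replaced by three declarative passes: find the first element that stops the scan (no match and > prefix), slice the region before it, and read off the first and last matching index in that region.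
import Mathlib
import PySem

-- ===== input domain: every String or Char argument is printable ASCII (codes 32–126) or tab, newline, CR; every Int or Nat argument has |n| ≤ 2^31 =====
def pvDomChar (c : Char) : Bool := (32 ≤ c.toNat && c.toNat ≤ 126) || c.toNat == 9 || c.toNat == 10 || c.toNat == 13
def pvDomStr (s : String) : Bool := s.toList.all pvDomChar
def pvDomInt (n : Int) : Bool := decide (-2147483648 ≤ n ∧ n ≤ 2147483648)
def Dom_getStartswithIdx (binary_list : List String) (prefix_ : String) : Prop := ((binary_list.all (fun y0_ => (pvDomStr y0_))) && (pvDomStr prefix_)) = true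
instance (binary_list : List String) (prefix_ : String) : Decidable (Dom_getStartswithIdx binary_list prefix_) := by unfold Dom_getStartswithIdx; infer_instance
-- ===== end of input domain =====

-- B replaces A's single stateful scan (accumulators + early return) by three declarative
-- passes: find the first stopping element, slice the region before it, and take the first
-- and last matching index in that region (objective: alternative decomposition, same cost).

-- ===== PORT A =====
-- the for-loop over enumerate(binary_list), with accumulators startIdx/endIdx and n = len(binary_list)
def getStartswithIdxLoop (prefix_ : String) (startIdx endIdx n : Int) : List (Int × String) → List Int
  | [] => if endIdx > -1 then [startIdx, endIdx] else [n, n - 1]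
  | (idx, binary) :: rest =>
      if PySem.Str.startswith binary prefix_ then
        getStartswithIdxLoop prefix_ (if startIdx = -1 then idx else startIdx) idx n rest
      else if prefix_ < binary then
        [startIdx, endIdx]
      else
        getStartswithIdxLoop prefix_ startIdx endIdx n rest

def getStartswithIdx (binary_list : List String) (prefix_ : String) : List Int :=
  if (PySem.List.len binary_list) = 0 then [-1, -1]
  else getStartswithIdxLoop prefix_ (-1) (-1) (PySem.List.len binary_list)
         (PySem.List.enumerate binary_list 0)

-- ===== PORT B =====
def getStartswithIdx_alt (binary_list : List String) (prefix_ : String) : List Int :=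
  if binary_list = [] then [-1, -1]
  else
    let stop : Option Int :=
      ((PySem.List.enumerate binary_list 0).find?
        (fun p => !PySem.Str.startswith p.2 prefix_ && decide (prefix_ < p.2))).map (·.1)
    let region : List String :=
      match stop with
      | none => binary_list
      | some i => PySem.List.slice binary_list none (some i)
    let ms : List Int :=
      ((PySem.List.enumerate region 0).filter
        (fun p => PySem.Str.startswith p.2 prefix_)).map (·.1)
    match ms with
    | m :: rest => [m, (m :: rest).getLast (List.cons_ne_nil _ _)]
    | [] =>
      match stop with
      | some _ => [-1, -1]
      | none => [PySem.List.len binary_list, PySem.List.len binary_list - 1]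

-- ===== PRECONDITION & SPEC =====
def Spec_getStartswithIdx (binary_list : List String) (prefix_ : String) (out : List Int) : Prop := out = getStartswithIdx_alt binary_list prefix_
instance (binary_list : List String) (prefix_ : String) (out : List Int) : Decidable (Spec_getStartswithIdx binary_list prefix_ out) := by unfold Spec_getStartswithIdx; infer_instance

-- ===== CLAIM (what is proved, stated in full; the proofs are below) =====
def Claim_equal_getStartswithIdx : Prop := ∀ (binary_list : List String) (prefix_ : String), Dom_getStartswithIdx binary_list prefix_ → Spec_getStartswithIdx binary_list prefix_ (getStartswithIdx binary_list prefix_)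

-- ===== LEMMAS AND PROOFS =====

-- pvBad prefix_ x : the element at which A's scan stops (does not match and is > prefix)
def pvBad (prefix_ : String) (x : String) : Bool :=
  !PySem.Str.startswith x prefix_ && decide (prefix_ < x)

-- pvMs prefix_ xs s : the indices (offset s) of the elements of xs starting with prefix_
def pvMs (prefix_ : String) : List String → Int → List Int
  | [], _ => []
  | x :: xs, s =>
      if PySem.Str.startswith x prefix_ then s :: pvMs prefix_ xs (s + 1)
      else pvMs prefix_ xs (s + 1)

theorem pvMs_eq (prefix_ : String) (xs : List String) (s : Int) :
    ((PySem.List.enumerate xs s).filter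
        (fun p => PySem.Str.startswith p.2 prefix_)).map (·.1) = pvMs prefix_ xs s := by
  induction xs generalizing s with
  | nil => simp [pvMs, PySem.List.enumerate_nil]
  | cons x xs ih =>
      simp only [PySem.List.enumerate_cons, List.filter_cons, pvMs]
      by_cases h : PySem.Chars.startswith x.toList prefix_.toList = true <;>
        simp [PySem.Str.startswith_eq, h] <;> simpa using ih (s + 1)

theorem pvFind_eq (prefix_ : String) (xs : List String) (s : Int) :
    ((PySem.List.enumerate xs s).find? (fun p => pvBad prefix_ p.2)).map (·.1) =
      if xs.any (pvBad prefix_) then some (s + (xs.findIdx (pvBad prefix_) : Int)) else none := by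
  induction xs generalizing s with
  | nil => simp [PySem.List.enumerate_nil]
  | cons x xs ih =>
      simp only [PySem.List.enumerate_cons, List.find?_cons, List.any_cons, List.findIdx_cons]
      by_cases h : pvBad prefix_ x
      · simp [h]
      · simp only [h, Bool.false_or, cond_false]
        rw [ih]
        split_ifs with h2 <;> simp
        ring

theorem pvGetLastD_cons (a d : Int) (l : List Int) :
    (a :: l).getLast?.getD d = l.getLast?.getD a := by
  induction l generalizing a with
  | nil => simp
  | cons b t _ =>
      rw [List.getLast?_cons_cons]
      cases hg : (b :: t).getLast? with
      | none => simp at hg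
      | some v => simp

theorem pvTake_findIdx (p : String → Bool) (xs : List String) :
    xs.take (xs.findIdx p) = xs.takeWhile (fun x => !p x) := by
  induction xs with
  | nil => simp
  | cons x xs ih =>
      by_cases h : p x <;> simp [List.findIdx_cons, h, ih]

-- loop with both accumulators set: first result is frozen, second is the last match in the region
theorem pvLoop_set (prefix_ : String) (xs : List String) (s sI eI n : Int)
    (hs : 0 ≤ s) (hI : sI ≠ -1) (h : eI > -1) :
    getStartswithIdxLoop prefix_ sI eI n (PySem.List.enumerate xs s) =
      [sI, (pvMs prefix_ (xs.takeWhile (fun x => !pvBad prefix_ x)) s).getLastD eI] := by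
  induction xs generalizing s eI with
  | nil => simp [PySem.List.enumerate_nil, getStartswithIdxLoop, h, pvMs]
  | cons x xs ih =>
      rw [PySem.List.enumerate_cons]
      by_cases hsw : PySem.Chars.startswith x.toList prefix_.toList = true
      · have hbad : pvBad prefix_ x = false := by
          simp [pvBad, PySem.Str.startswith_eq, hsw]
        simp only [getStartswithIdxLoop, PySem.Str.startswith_eq, hsw, if_true, if_neg hI]
        rw [ih (s + 1) s (by omega) (by omega)]
        simp only [List.takeWhile_cons, hbad, Bool.not_false, if_true, pvMs,
          PySem.Str.startswith_eq, hsw, List.getLastD_eq_getLast?]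
        rw [pvGetLastD_cons s eI]
      · by_cases hlt : prefix_ < x
        · have hbad : pvBad prefix_ x = true := by
            simp [pvBad, PySem.Str.startswith_eq, hsw, hlt]
          simp [getStartswithIdxLoop, PySem.Str.startswith_eq, hsw, hlt, hbad, pvMs]
        · have hbad : pvBad prefix_ x = false := by
            simp [pvBad, PySem.Str.startswith_eq, hsw, hlt]
          simp only [getStartswithIdxLoop, PySem.Str.startswith_eq, hsw, if_neg hlt]
          rw [ih (s + 1) eI (by omega) h]
          simp [hbad, pvMs, PySem.Str.startswith_eq, hsw]

-- loop from the initial accumulators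
theorem pvLoop_init (prefix_ : String) (xs : List String) (s n : Int) (hs : 0 ≤ s) :
    getStartswithIdxLoop prefix_ (-1) (-1) n (PySem.List.enumerate xs s) =
      match pvMs prefix_ (xs.takeWhile (fun x => !pvBad prefix_ x)) s with
      | m :: rest => [m, (m :: rest).getLast (List.cons_ne_nil _ _)]
      | [] => if xs.any (pvBad prefix_) then [-1, -1] else [n, n - 1] := by
  induction xs generalizing s with
  | nil => simp [PySem.List.enumerate_nil, getStartswithIdxLoop, pvMs]
  | cons x xs ih =>
      rw [PySem.List.enumerate_cons]
      by_cases hsw : PySem.Chars.startswith x.toList prefix_.toList = true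
      · have hbad : pvBad prefix_ x = false := by
          simp [pvBad, PySem.Str.startswith_eq, hsw]
        simp only [getStartswithIdxLoop, PySem.Str.startswith_eq, hsw, if_true]
        rw [pvLoop_set prefix_ xs (s + 1) s s n (by omega) (by omega) (by omega)]
        simp only [List.takeWhile_cons, hbad, Bool.not_false, if_true, pvMs,
          PySem.Str.startswith_eq, hsw]
        simp [List.getLast_eq_getLastD]
      · by_cases hlt : prefix_ < x
        · have hbad : pvBad prefix_ x = true := by
            simp [pvBad, PySem.Str.startswith_eq, hsw, hlt]
          simp [getStartswithIdxLoop, PySem.Str.startswith_eq, hsw, hlt, hbad, pvMs]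
        · have hbad : pvBad prefix_ x = false := by
            simp [pvBad, PySem.Str.startswith_eq, hsw, hlt]
          simp only [getStartswithIdxLoop, PySem.Str.startswith_eq, hsw, if_neg hlt]
          rw [ih (s + 1) (by omega)]
          simp [hbad, pvMs, PySem.Str.startswith_eq, hsw]

theorem pvMain (binary_list : List String) (prefix_ : String) :
    getStartswithIdx binary_list prefix_ = getStartswithIdx_alt binary_list prefix_ := by
  rcases binary_list with _ | ⟨x, xs⟩
  · simp [getStartswithIdx, getStartswithIdx_alt, PySem.List.len]
  · set l := x :: xs with hl
    have hne : l ≠ [] := by simp [hl]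
    have hlen : ¬ PySem.List.len l = 0 := by
      simp only [hl, PySem.List.len_eq, List.length_cons]
      omega
    unfold getStartswithIdx getStartswithIdx_alt
    rw [if_neg hlen, if_neg hne]
    rw [pvLoop_init prefix_ l 0 (PySem.List.len l) le_rfl]
    have hbadeq : (fun p : Int × String => !PySem.Str.startswith p.2 prefix_ && decide (prefix_ < p.2))
        = (fun p : Int × String => pvBad prefix_ p.2) := by
      funext p; simp [pvBad]
    rw [hbadeq, pvFind_eq]
    by_cases hany : l.any (pvBad prefix_)
    · simp only [if_pos hany, zero_add]
      have hregion : PySem.List.slice l none (some ((l.findIdx (pvBad prefix_) : Nat) : Int))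
          = l.takeWhile (fun y => !pvBad prefix_ y) := by
        rw [PySem.List.slice_to_natCast, pvTake_findIdx]
      rw [hregion, pvMs_eq]

    · simp only [if_neg hany]
      have hself : l.takeWhile (fun y => !pvBad prefix_ y) = l := by
        rw [List.takeWhile_eq_self_iff]
        intro a ha
        simp only [Bool.not_eq_true']
        exact Bool.eq_false_iff.mpr (fun hc => hany (List.any_eq_true.mpr ⟨a, ha, hc⟩))
      rw [pvMs_eq, hself]

-- ===== VERDICT (by name: the statement is the Claim_ definition above) =====
theorem getStartswithIdx_spec : Claim_equal_getStartswithIdx := by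
  intro binary_list prefix_ _
  exact pvMain binary_list prefix_
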